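-- pv_equiv track=rewrite | github.com/zhuying412/bam-shot | bam2img/bam.py | create_reads
-- ===== SOURCE A (Python) =====
-- def create_reads(lines: list[str], cigars: list[str], ref_with_ins: bool) -> list[list[str]]:
--     reads = list()
--     for line in lines:
--         line = line.upper()
--         bases = list()
--         for i in range(len(cigars)):
--             base = '-' if line[i] == '*' else line[i]
--             if cigars[i] == 'I':
--                 if ref_with_ins:
--                     bases.append(base)
--                 else:
--                     if base not in [' ', '-']:
--                         if not bases[-1].endswith('I'):
--                             bases[-1] += 'I'
--             else:
--                 bases.append(base)
--         reads.append(bases)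
--     return reads
-- ===== SOURCE B (Python) =====
-- def create_reads(lines: list[str], cigars: list[str], ref_with_ins: bool) -> list[list[str]]:
--     n = len(cigars)
--     if ref_with_ins:
--         # every position (insertions included) keeps its own base
--         return [['-' if ch == '*' else ch for ch in line.upper()[:n]] for line in lines]
--     # group cigar positions into reference columns: one anchor (non-'I') position
--     # plus the run of 'I' positions that follows it; leading 'I' positions have no anchor
--     cols = []
--     for i in range(n):
--         if cigars[i] == 'I':
--             if cols:
--                 cols[-1][1].append(i)
--         else:
--             cols.append((i, []))
--     reads = []
--     for line in lines:
--         u = line.upper()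
--         bases = []
--         for anchor, ins in cols:
--             ch = u[anchor]
--             base = '-' if ch == '*' else ch
--             if any(u[j] not in ' -*' for j in ins):
--                 base += 'I'
--             bases.append(base)
--         reads.append(bases)
--     return reads
-- ===== Notes on version B (the rewrite author's own statement) =====
-- stated objective: alternative
-- what changed: B precomputes from the cigars, once, the list of reference columns (anchor position plus the run of following 'I' positions) and renders every line by mapping over these columns (with ref_with_ins=True reduced to a plain per-character transform of line[:len(cigars)]), instead of A's per-line stateful scan over all cigar positions that mutates the last collected base in place.
-- intended difference: With ref_with_ins=False, on inputs where a cigar 'I' position holds a real inserted base and the (uppercased) base at its anchor position is literally the character 'I', A's endswith('I') dedup mistakes the anchor base for an already-added marker and returns just 'I' for that column, while B uniformly appends the marker and returns 'II', which is the intended base+marker encoding. — e.g. on create_reads(["IA"], ["M", "I"], false): A returns [["I"]], B returns [["II"]]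
import Mathlib
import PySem

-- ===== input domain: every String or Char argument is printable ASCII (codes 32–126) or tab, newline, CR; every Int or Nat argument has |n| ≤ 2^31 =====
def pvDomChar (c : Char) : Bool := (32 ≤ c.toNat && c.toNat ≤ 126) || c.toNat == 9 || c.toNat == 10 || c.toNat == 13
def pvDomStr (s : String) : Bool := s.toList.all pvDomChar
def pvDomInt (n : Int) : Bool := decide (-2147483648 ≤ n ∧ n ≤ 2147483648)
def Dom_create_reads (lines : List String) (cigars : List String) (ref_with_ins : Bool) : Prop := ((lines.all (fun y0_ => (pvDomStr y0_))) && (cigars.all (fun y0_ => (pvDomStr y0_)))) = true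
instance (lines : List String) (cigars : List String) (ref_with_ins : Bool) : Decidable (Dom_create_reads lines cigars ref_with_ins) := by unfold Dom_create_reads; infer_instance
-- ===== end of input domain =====

-- B rebuilds the read matrix by precomputing the cigar's reference columns (anchor + following
-- 'I' run) once and mapping each line over them, instead of A's stateful scan mutating the last
-- base; on the corner where the anchor base is literally 'I' B appends the marker A drops (D_ below).
-- Strings are modelled on the List Char side (PySem.Chars); each read's bases are built as
-- List Char and wrapped with String.ofList where Python appends the finished list.

-- shared helpers (used by both ports and by Pre_/D_)
-- uppercased character list of a line (Python line.upper())
def pvUp (line : String) : List Char := PySem.Chars.upper line.toList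
-- base = '-' if ch == '*' else ch
def pvBase (ch : Char) : List Char := if ch = '*' then ['-'] else [ch]
-- "the (uppercased) character at j is a real base", i.e. not in ' -*'
def pvReal (u : List Char) (j : Nat) : Bool := decide (u.getD j ' ' ∉ ([' ', '-', '*'] : List Char))

-- ===== PORT A =====
-- body of A's inner loop over i in range(len(cigars)); line[i] is total here via getD:
-- Pre_ excludes the inputs where Python raises (short line / bases[-1] on empty bases)
def pvStepA (u : List Char) (cigars : List String) (ref_with_ins : Bool)
    (bases : List (List Char)) (i : Nat) : List (List Char) :=
  let base := pvBase (u.getD i ' ')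
  if cigars.getD i "" = "I" then
    if ref_with_ins then bases ++ [base]
    else
      if base ∉ ([[' '], ['-']] : List (List Char)) then
        if ¬ (PySem.Chars.endswith (bases.getLastD []) ['I'] = true) then
          bases.dropLast ++ [bases.getLastD [] ++ ['I']]   -- bases[-1] += 'I'
        else bases
      else bases
  else bases ++ [base]

def pvLineA (u : List Char) (cigars : List String) (ref_with_ins : Bool) : List (List Char) :=
  (List.range cigars.length).foldl (pvStepA u cigars ref_with_ins) []

def create_reads (lines : List String) (cigars : List String) (ref_with_ins : Bool) : List (List String) :=
  lines.foldl (fun reads line => reads ++ [(pvLineA (pvUp line) cigars ref_with_ins).map String.ofList]) []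

-- ===== PORT B =====
-- columns: for i in range(len(cigars)): 'I' extends the last column's insertion list (if any),
-- anything else opens a new column (i, [])
def pvColsOf (cigars : List String) : List (Nat × List Nat) :=
  (List.range cigars.length).foldl (fun cols i =>
    if cigars.getD i "" = "I" then
      match cols.getLast? with
      | none => cols
      | some c => cols.dropLast ++ [(c.1, c.2 ++ [i])]
    else cols ++ [(i, [])]) []

-- render one column of one (uppercased) line
def pvRenderB (u : List Char) (col : Nat × List Nat) : List Char :=
  let base := pvBase (u.getD col.1 ' ')
  if col.2.any (fun j => pvReal u j) then base ++ ['I'] else base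

def create_reads_alt (lines : List String) (cigars : List String) (ref_with_ins : Bool) : List (List String) :=
  if ref_with_ins then
    lines.map (fun line => ((pvUp line).take cigars.length).map (fun ch => String.ofList (pvBase ch)))
  else
    lines.map (fun line => ((pvColsOf cigars).map (pvRenderB (pvUp line))).map String.ofList)

-- ===== PRECONDITION & SPEC =====
-- Pre_ = exactly the inputs where Python A returns: every line at least as long as cigars
-- (line[i] IndexError otherwise), and, when ref_with_ins is false, no real base on a leading-'I'
-- cigar position (there bases is still empty and bases[-1] raises IndexError)
def Pre_create_reads (lines : List String) (cigars : List String) (ref_with_ins : Bool) : Prop :=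
  (∀ line ∈ lines, cigars.length ≤ line.toList.length) ∧
  (ref_with_ins = false → ∀ line ∈ lines, ∀ i ∈ List.range cigars.length,
    (∀ k ∈ List.range (i + 1), cigars.getD k "" = "I") →
      (PySem.Chars.upper line.toList).getD i ' ' ∈ ([' ', '-', '*'] : List Char))

instance (lines : List String) (cigars : List String) (ref_with_ins : Bool) : Decidable (Pre_create_reads lines cigars ref_with_ins) := by
  unfold Pre_create_reads; infer_instance

def pvWitness_create_reads : List String × List String × Bool := (["ACG*"], ["M", "I", "M"], false)

-- With ref_with_ins=False, on inputs where an 'I' cigar position holds a real inserted base and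
-- the uppercased base at its anchor (the previous non-'I' position) is literally 'I', A's
-- endswith('I') dedup swallows the marker and returns "I" for that column, while B uniformly
-- appends the marker and returns "II" — the intended base+marker encoding.
def D_create_reads (lines : List String) (cigars : List String) (ref_with_ins : Bool) : Prop :=
  ref_with_ins = false ∧ ∃ line ∈ lines, ∃ i ∈ List.range cigars.length, ∃ j ∈ List.range i,
    cigars.getD i "" = "I" ∧ cigars.getD j "" ≠ "I" ∧
    (∀ k ∈ List.range i, j < k → cigars.getD k "" = "I") ∧
    (PySem.Chars.upper line.toList).getD j ' ' = 'I' ∧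
    (PySem.Chars.upper line.toList).getD i ' ' ∉ ([' ', '-', '*'] : List Char)

instance (lines : List String) (cigars : List String) (ref_with_ins : Bool) : Decidable (D_create_reads lines cigars ref_with_ins) := by
  unfold D_create_reads; infer_instance

def Spec_create_reads (lines : List String) (cigars : List String) (ref_with_ins : Bool) (out : List (List String)) : Prop :=
  ¬ D_create_reads lines cigars ref_with_ins → out = create_reads_alt lines cigars ref_with_ins

instance (lines : List String) (cigars : List String) (ref_with_ins : Bool) (out : List (List String)) : Decidable (Spec_create_reads lines cigars ref_with_ins out) := by
  unfold Spec_create_reads; infer_instance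

def pvDiffWitness_create_reads : List String × List String × Bool := (["IA"], ["M", "I"], false)
def pvDiffWitnessOut_create_reads : (List (List String)) × (List (List String)) := ([["I"]], [["II"]])

-- ===== CLAIM (what is proved, stated in full; the proofs are below) =====
def Claim_unchanged_create_reads : Prop := ∀ (lines : List String) (cigars : List String) (ref_with_ins : Bool), Dom_create_reads lines cigars ref_with_ins → Pre_create_reads lines cigars ref_with_ins → Spec_create_reads lines cigars ref_with_ins (create_reads lines cigars ref_with_ins)
def Claim_changed_create_reads : Prop := Dom_create_reads (pvDiffWitness_create_reads.1) (pvDiffWitness_create_reads.2.1) (pvDiffWitness_create_reads.2.2) ∧ Pre_create_reads (pvDiffWitness_create_reads.1) (pvDiffWitness_create_reads.2.1) (pvDiffWitness_create_reads.2.2) ∧ D_create_reads (pvDiffWitness_create_reads.1) (pvDiffWitness_create_reads.2.1) (pvDiffWitness_create_reads.2.2) ∧ create_reads (pvDiffWitness_create_reads.1) (pvDiffWitness_create_reads.2.1) (pvDiffWitness_create_reads.2.2) = pvDiffWitnessOut_create_reads.1 ∧ create_reads_alt (pvDiffWitness_create_reads.1) (pvDiffWitness_create_reads.2.1) (pvDiffWitness_create_reads.2.2)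 = pvDiffWitnessOut_create_reads.2 ∧ pvDiffWitnessOut_create_reads.1 ≠ pvDiffWitnessOut_create_reads.2
def Claim_exact_create_reads : Prop := ∀ (lines : List String) (cigars : List String) (ref_with_ins : Bool), Dom_create_reads lines cigars ref_with_ins → Pre_create_reads lines cigars ref_with_ins → D_create_reads lines cigars ref_with_ins → create_reads lines cigars ref_with_ins ≠ create_reads_alt lines cigars ref_with_ins

-- ===== LEMMAS AND PROOFS =====

-- proof-only helper: what A actually produces per column (marker dropped when the anchor base is 'I')
def pvRenderA (u : List Char) (col : Nat × List Nat) : List Char :=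
  let base := pvBase (u.getD col.1 ' ')
  if col.2.any (fun j => pvReal u j) ∧ base ≠ ['I'] then base ++ ['I'] else base

theorem pv_getD_append_lt {α : Type} (l l' : List α) (d : α) (n : Nat) (h : n < l.length) :
    (l ++ l').getD n d = l.getD n d := by
  simp [List.getD_eq_getElem?_getD, List.getElem?_append_left h]

theorem pv_getD_append_len {α : Type} (l : List α) (c d : α) : (l ++ [c]).getD l.length d = c := by
  simp [List.getD_eq_getElem?_getD]

theorem pv_foldl_range_congr {β : Type} (f g : β → Nat → β) (n : Nat) (b : β)
    (h : ∀ acc i, i < n → f acc i = g acc i) :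
    (List.range n).foldl f b = (List.range n).foldl g b := by
  induction n generalizing b with
  | zero => rfl
  | succ m ih =>
    rw [List.range_succ, List.foldl_append, List.foldl_append, ih _ (fun acc i hi => h acc i (by omega))]
    exact h _ m (by omega)

theorem pv_endswith_singleton (c : Char) : PySem.Chars.endswith [c] ['I'] = decide (c = 'I') := by
  rcases Decidable.em (c = 'I') with h | h
  · simp [PySem.Chars.endswith_iff, h]
  · simp only [h, decide_false]
    rw [← Bool.not_eq_true, PySem.Chars.endswith_iff]
    rintro ⟨t, ht⟩
    cases t with
    | nil => simp at ht; exact h ht.symm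
    | cons x xs => have := congrArg List.length ht; simp at this

theorem pv_endswith_append_I (xs : List Char) : PySem.Chars.endswith (xs ++ ['I']) ['I'] = true := by
  simp [PySem.Chars.endswith_iff]

theorem pv_colsOf_snoc (cs : List String) (c : String) :
    pvColsOf (cs ++ [c]) =
      if c = "I" then
        match (pvColsOf cs).getLast? with
        | none => pvColsOf cs
        | some p => (pvColsOf cs).dropLast ++ [(p.1, p.2 ++ [cs.length])]
      else pvColsOf cs ++ [(cs.length, [])] := by
  unfold pvColsOf
  rw [List.length_append, List.length_singleton, List.range_succ, List.foldl_append,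
    pv_foldl_range_congr _ (fun cols i =>
      if cs.getD i "" = "I" then
        match cols.getLast? with
        | none => cols
        | some c => cols.dropLast ++ [(c.1, c.2 ++ [i])]
      else cols ++ [(i, [])]) _ _
      (fun acc i hi => by rw [pv_getD_append_lt _ _ _ _ hi])]
  simp only [List.foldl_cons, List.foldl_nil, pv_getD_append_len]

theorem pv_getLast?_concat {α : Type} (l : List α) (x : α) : (l ++ [x]).getLast? = some x := by
  simp

theorem pv_colsOf_snoc_none (cs : List String) (c : String) (hc : c = "I")
    (h : (pvColsOf cs).getLast? = none) : pvColsOf (cs ++ [c]) = pvColsOf cs := by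
  rw [pv_colsOf_snoc, if_pos hc, h]

theorem pv_colsOf_snoc_some (cs : List String) (c : String) (p : Nat × List Nat) (hc : c = "I")
    (h : (pvColsOf cs).getLast? = some p) :
    pvColsOf (cs ++ [c]) = (pvColsOf cs).dropLast ++ [(p.1, p.2 ++ [cs.length])] := by
  rw [pv_colsOf_snoc, if_pos hc, h]

theorem pv_colsOf_snoc_ne (cs : List String) (c : String) (hc : c ≠ "I") :
    pvColsOf (cs ++ [c]) = pvColsOf cs ++ [(cs.length, [])] := by
  rw [pv_colsOf_snoc, if_neg hc]

theorem pv_lineA_snoc (u : List Char) (cs : List String) (c : String) (r : Bool) :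
    pvLineA u (cs ++ [c]) r = pvStepA u (cs ++ [c]) r (pvLineA u cs r) cs.length := by
  unfold pvLineA
  rw [List.length_append, List.length_singleton, List.range_succ, List.foldl_append,
    pv_foldl_range_congr _ (pvStepA u cs r) _ _
      (fun acc i hi => by unfold pvStepA; rw [pv_getD_append_lt _ _ _ _ hi])]
  simp only [List.foldl_cons, List.foldl_nil]

-- structural facts about pvColsOf
theorem pv_colsOf_spec (cs : List String) :
    (pvColsOf cs = [] → ∀ i, i < cs.length → cs.getD i "" = "I") ∧
    (∀ a ins, (a, ins) ∈ pvColsOf cs → a < cs.length ∧ cs.getD a "" ≠ "I" ∧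
      ∀ i ∈ ins, a < i ∧ i < cs.length ∧ cs.getD i "" = "I" ∧
        (∀ k, a < k → k < i → cs.getD k "" = "I")) ∧
    (∀ a ins, (pvColsOf cs).getLast? = some (a, ins) →
      ∀ k, a < k → k < cs.length → cs.getD k "" = "I") := by
  induction cs using List.reverseRecOn with
  | nil =>
    refine ⟨fun _ i hi => absurd hi (by simp), fun a ins h => ?_, fun a ins h => ?_⟩ <;>
      simp [pvColsOf] at h
  | append_singleton cs c ih =>
    obtain ⟨ih1, ih2, ih3⟩ := ih
    have hlen : (cs ++ [c]).length = cs.length + 1 := by simp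
    -- lift an old member's properties to cs ++ [c]
    have lift : ∀ a ins, (a, ins) ∈ pvColsOf cs → a < (cs ++ [c]).length ∧
        (cs ++ [c]).getD a "" ≠ "I" ∧
        ∀ i ∈ ins, a < i ∧ i < (cs ++ [c]).length ∧ (cs ++ [c]).getD i "" = "I" ∧
          (∀ k, a < k → k < i → (cs ++ [c]).getD k "" = "I") := by
      intro a ins hm
      obtain ⟨h1, h2, h3⟩ := ih2 a ins hm
      refine ⟨by rw [hlen]; omega, by rw [pv_getD_append_lt _ _ _ _ h1]; exact h2, ?_⟩
      intro i hi
      obtain ⟨g1, g2, g3, g4⟩ := h3 i hi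
      exact ⟨g1, by rw [hlen]; omega, by rw [pv_getD_append_lt _ _ _ _ g2]; exact g3,
        fun k hk1 hk2 => by rw [pv_getD_append_lt _ _ _ _ (by omega)]; exact g4 k hk1 hk2⟩
    by_cases hc : c = "I"
    · cases hlast : (pvColsOf cs).getLast? with
      | none =>
        have hemp : pvColsOf cs = [] := by simpa using hlast
        rw [pv_colsOf_snoc_none cs c hc hlast]
        refine ⟨fun _ i hi => ?_, fun a ins h => ?_, fun a ins h => ?_⟩
        · rw [hlen] at hi
          rcases Nat.lt_or_ge i cs.length with h' | h'
          · rw [pv_getD_append_lt _ _ _ _ h']; exact ih1 hemp i h'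
          · have : i = cs.length := by omega
            subst this; rw [pv_getD_append_len]; exact hc
        · rw [hemp] at h; simp at h
        · rw [hemp] at h; simp at h
      | some p =>
        have hpmem : p ∈ pvColsOf cs := List.mem_of_getLast? hlast
        have hp := ih2 p.1 p.2 (by simpa using hpmem)
        have hp3 := ih3 p.1 p.2 (by simpa using hlast)
        rw [pv_colsOf_snoc_some cs c p hc hlast]
        refine ⟨fun h => by simp at h, fun a ins h => ?_, fun a ins h => ?_⟩
        · rcases List.mem_append.1 h with h' | h'
          · exact lift a ins (List.dropLast_subset _ h')
          · simp only [List.mem_singleton, Prod.mk.injEq] at h'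
            obtain ⟨ha, hins⟩ := h'
            subst ha; subst hins
            refine ⟨by rw [hlen]; omega, by rw [pv_getD_append_lt _ _ _ _ hp.1]; exact hp.2.1, ?_⟩
            intro i hi
            rcases List.mem_append.1 hi with h2 | h2
            · exact (lift p.1 p.2 hpmem).2.2 i h2
            · simp only [List.mem_singleton] at h2; subst h2
              refine ⟨hp.1, by rw [hlen]; omega, by rw [pv_getD_append_len]; exact hc, ?_⟩
              intro k hk1 hk2
              rw [pv_getD_append_lt _ _ _ _ hk2]; exact hp3 k hk1 hk2
        · rw [pv_getLast?_concat] at h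
          simp only [Option.some.injEq, Prod.mk.injEq] at h
          obtain ⟨ha, hins⟩ := h
          subst ha
          intro k hk1 hk2
          rw [hlen] at hk2
          rcases Nat.lt_or_ge k cs.length with h' | h'
          · rw [pv_getD_append_lt _ _ _ _ h']; exact hp3 k hk1 h'
          · have : k = cs.length := by omega
            subst this; rw [pv_getD_append_len]; exact hc
    · rw [pv_colsOf_snoc_ne cs c hc]
      refine ⟨fun h => by simp at h, fun a ins h => ?_, fun a ins h => ?_⟩
      · rcases List.mem_append.1 h with h' | h'
        · exact lift a ins h'
        · simp only [List.mem_singleton, Prod.mk.injEq] at h'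
          obtain ⟨ha, hins⟩ := h'
          subst ha; subst hins
          exact ⟨by rw [hlen]; omega, by rw [pv_getD_append_len]; exact hc, by simp⟩
      · rw [pv_getLast?_concat] at h
        simp only [Option.some.injEq, Prod.mk.injEq] at h
        obtain ⟨ha, hins⟩ := h
        subst ha
        intro k hk1 hk2
        rw [hlen] at hk2; omega

-- A's line result, characterised on columns (no hypotheses about insertion bases or D_)
theorem pv_base_eq_I (ch : Char) : pvBase ch = ['I'] ↔ ch = 'I' := by
  by_cases h : ch = '*'
  · subst h; simp only [pvBase, if_pos rfl]; decide
  · simp [pvBase, h]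

theorem pv_base_not_real (u : List Char) (n : Nat) (h : pvReal u n = false) :
    pvBase (u.getD n ' ') ∈ ([[' '], ['-']] : List (List Char)) := by
  unfold pvReal at h
  simp only [decide_eq_false_iff_not, not_not, List.mem_cons, List.not_mem_nil, or_false] at h
  generalize u.getD n ' ' = x at h ⊢
  rcases h with h | h | h <;> subst h <;> simp [pvBase]

theorem pv_base_real (u : List Char) (n : Nat) (h : pvReal u n = true) :
    pvBase (u.getD n ' ') ∉ ([[' '], ['-']] : List (List Char)) := by
  unfold pvReal at h
  simp only [decide_eq_true_eq, List.mem_cons, List.not_mem_nil, or_false, not_or] at h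
  generalize u.getD n ' ' = x at h ⊢
  obtain ⟨h1, h2, h3⟩ := h
  by_cases hch : x = '*'
  · exact absurd hch h3
  · simp only [pvBase, if_neg hch, List.mem_cons, List.not_mem_nil, or_false, not_or]
    exact ⟨fun hh => h1 (by injection hh), fun hh => h2 (by injection hh)⟩

theorem pv_endswith_base (ch : Char) : PySem.Chars.endswith (pvBase ch) ['I'] = decide (ch = 'I') := by
  by_cases h : ch = '*'
  · subst h; simp only [pvBase, if_pos rfl, pv_endswith_singleton]; decide
  · simp [pvBase, h, pv_endswith_singleton]

theorem pv_getLastD_concat {α : Type} (l : List α) (x d : α) : (l ++ [x]).getLastD d = x := by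
  simp [List.getLastD_eq_getLast?]

theorem pv_lineA_false (u : List Char) (cs : List String)
    (hlead : ∀ i, i < cs.length → (∀ k, k ≤ i → cs.getD k "" = "I") → pvReal u i = false) :
    pvLineA u cs false = (pvColsOf cs).map (pvRenderA u) := by
  induction cs using List.reverseRecOn with
  | nil => rfl
  | append_singleton cs c ih =>
    have hlead' : ∀ i, i < cs.length → (∀ k, k ≤ i → cs.getD k "" = "I") → pvReal u i = false := by
      intro i hi h
      exact hlead i (by simp; omega)
        (fun k hk => by rw [pv_getD_append_lt _ _ _ _ (by omega)]; exact h k hk)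
    rw [pv_lineA_snoc, ih hlead']
    by_cases hc : c = "I"
    · cases hlast : (pvColsOf cs).getLast? with
      | none =>
        have hemp : pvColsOf cs = [] := by simpa using hlast
        have hallI := (pv_colsOf_spec cs).1 hemp
        have hreal : pvReal u cs.length = false := by
          refine hlead cs.length (by simp) (fun k hk => ?_)
          rcases Nat.lt_or_ge k cs.length with h' | h'
          · rw [pv_getD_append_lt _ _ _ _ h']; exact hallI k h'
          · have : k = cs.length := by omega
            subst this; rw [pv_getD_append_len]; exact hc
        rw [pv_colsOf_snoc_none cs c hc hlast, hemp]
        simp only [pvStepA, pv_getD_append_len, if_pos hc, Bool.false_eq_true, if_false,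
          List.map_nil]
        rw [if_neg (not_not_intro (pv_base_not_real u cs.length hreal))]
      | some p =>
        obtain ⟨q, hq⟩ := List.getLast?_eq_some_iff.1 hlast
        rw [pv_colsOf_snoc_some cs c p hc hlast, hq]
        simp only [pvStepA, pv_getD_append_len, if_pos hc, Bool.false_eq_true, if_false,
          List.dropLast_concat, List.map_append, List.map_cons, List.map_nil]
        by_cases hr : pvReal u cs.length = true
        · rw [if_pos (pv_base_real u cs.length hr)]
          rw [pv_getLastD_concat]
          by_cases hbI : pvBase (u.getD p.1 ' ') = ['I']
          · have h1 : pvRenderA u p = pvBase (u.getD p.1 ' ') := by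
              simp only [pvRenderA]; rw [if_neg (fun hcon => hcon.2 hbI)]
            have h2 : pvRenderA u (p.1, p.2 ++ [cs.length]) = pvBase (u.getD p.1 ' ') := by
              simp only [pvRenderA]; rw [if_neg (fun hcon => hcon.2 hbI)]
            rw [h1, h2, pv_endswith_base,
              decide_eq_true ((pv_base_eq_I _).1 hbI)]
            rw [if_neg (by simp)]
          · by_cases hany : p.2.any (fun j => pvReal u j) = true
            · have h1 : pvRenderA u p = pvBase (u.getD p.1 ' ') ++ ['I'] := by
                simp only [pvRenderA]; rw [if_pos ⟨hany, hbI⟩]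
              have h2 : pvRenderA u (p.1, p.2 ++ [cs.length]) = pvBase (u.getD p.1 ' ') ++ ['I'] := by
                simp only [pvRenderA]
                rw [if_pos ⟨by simp [List.any_append, hany], hbI⟩]
              rw [h1, h2, if_neg (by simp [pv_endswith_append_I])]
            · have h1 : pvRenderA u p = pvBase (u.getD p.1 ' ') := by
                simp only [pvRenderA]; rw [if_neg (fun hcon => hany hcon.1)]
              have h2 : pvRenderA u (p.1, p.2 ++ [cs.length]) = pvBase (u.getD p.1 ' ') ++ ['I'] := by
                simp only [pvRenderA]
                rw [if_pos ⟨by simp [List.any_append, hr], hbI⟩]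
              rw [h1, h2, pv_endswith_base,
                decide_eq_false_iff_not.2 (fun hh => hbI ((pv_base_eq_I _).2 hh))]
              rw [if_pos (by simp)]
        · have hr' : pvReal u cs.length = false := by simpa using hr
          rw [if_neg (not_not_intro (pv_base_not_real u cs.length hr'))]
          have h2 : pvRenderA u (p.1, p.2 ++ [cs.length]) = pvRenderA u p := by
            simp only [pvRenderA, List.any_append, List.any_cons, List.any_nil, hr',
              Bool.or_false]
          rw [h2]
    · rw [pv_colsOf_snoc_ne cs c hc]
      simp only [pvStepA, pv_getD_append_len, if_neg hc, List.map_append, List.map_cons,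
        List.map_nil]
      simp [pvRenderA]

theorem pv_lineA_true (u : List Char) (cs : List String) (hlen : cs.length ≤ u.length) :
    pvLineA u cs true = (u.take cs.length).map pvBase := by
  have hstep : pvStepA u cs true = fun bases i => bases ++ [pvBase (u.getD i ' ')] := by
    funext bases i
    unfold pvStepA
    by_cases h : cs.getD i "" = "I" <;> simp [h]
  unfold pvLineA
  rw [hstep, PySem.List.foldl_append_singleton_eq_map]
  apply List.ext_getElem
  · simp [Nat.min_eq_left hlen]
  · intro i h1 h2
    have hi : i < u.length := by simp at h1; omega
    simp [List.getD_eq_getElem?_getD, List.getElem?_eq_getElem hi]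

theorem pv_create_reads_eq_map (lines cigars : List String) (r : Bool) :
    create_reads lines cigars r = lines.map (fun line => (pvLineA (pvUp line) cigars r).map String.ofList) := by
  unfold create_reads
  exact PySem.List.foldl_append_singleton_eq_map _ _ _

theorem pv_real_true_iff (u : List Char) (j : Nat) :
    pvReal u j = true ↔ u.getD j ' ' ∉ ([' ', '-', '*'] : List Char) := by
  unfold pvReal; simp

theorem pv_real_false_iff (u : List Char) (j : Nat) :
    pvReal u j = false ↔ u.getD j ' ' ∈ ([' ', '-', '*'] : List Char) := by
  rw [← Bool.not_eq_true, pv_real_true_iff, not_not]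

theorem pv_up_length (l : List Char) : (PySem.Chars.upper l).length = l.length := by
  simp [PySem.Chars.upper]

-- pointwise agreement of the two renderings outside D_ (for one line of lines)
theorem pv_render_eq (lines cigars : List String) (line : String) (hline : line ∈ lines)
    (hnd : ¬ D_create_reads lines cigars false) :
    ∀ col ∈ pvColsOf cigars, pvRenderA (pvUp line) col = pvRenderB (pvUp line) col := by
  intro col hcol
  obtain ⟨ha1, ha2, ha3⟩ := (pv_colsOf_spec cigars).2.1 col.1 col.2 (by simpa using hcol)
  simp only [pvRenderA, pvRenderB]
  by_cases hany : col.2.any (fun j => pvReal (pvUp line) j) = true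
  · by_cases hbI : pvBase ((pvUp line).getD col.1 ' ') = ['I']
    · exfalso
      apply hnd
      obtain ⟨i, hi, hireal⟩ := List.any_eq_true.1 hany
      obtain ⟨g1, g2, g3, g4⟩ := ha3 i hi
      refine ⟨rfl, line, hline, i, List.mem_range.2 g2, col.1, List.mem_range.2 g1,
        g3, ha2, fun k hk hjk => g4 k hjk (List.mem_range.1 hk),
        (pv_base_eq_I _).1 hbI, (pv_real_true_iff _ _).1 hireal⟩
    · rw [if_pos ⟨hany, hbI⟩, if_pos hany]
  · rw [if_neg (fun hcon => hany hcon.1), if_neg hany]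

-- the member column of pvColsOf holding a given anchor j and 'I' position i
theorem pv_colsOf_mem (cs : List String) (j i : Nat) (hj : j < i) (hi : i < cs.length)
    (hcj : cs.getD j "" ≠ "I") (hci : cs.getD i "" = "I")
    (hmid : ∀ k, j < k → k < i → cs.getD k "" = "I") :
    ∃ ins, (j, ins) ∈ pvColsOf cs ∧ i ∈ ins := by
  induction cs using List.reverseRecOn with
  | nil => simp at hi
  | append_singleton cs c ih =>
    have hlen : (cs ++ [c]).length = cs.length + 1 := by simp
    rw [hlen] at hi
    obtain ⟨spec1, spec2, spec3⟩ := pv_colsOf_spec cs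
    rcases Nat.lt_or_ge i cs.length with hilt | hige
    · -- i lies in cs: use the inductive hypothesis and lift membership
      have hcj' : cs.getD j "" ≠ "I" := by
        rw [← pv_getD_append_lt cs [c] "" j (by omega)]; exact hcj
      have hci' : cs.getD i "" = "I" := by
        rw [← pv_getD_append_lt cs [c] "" i hilt]; exact hci
      have hmid' : ∀ k, j < k → k < i → cs.getD k "" = "I" := fun k h1 h2 => by
        rw [← pv_getD_append_lt cs [c] "" k (by omega)]; exact hmid k h1 h2
      obtain ⟨ins, hmem, hiins⟩ := ih hilt hcj' hci' hmid'
      by_cases hc : c = "I"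
      · cases hlast : (pvColsOf cs).getLast? with
        | none =>
          rw [pv_colsOf_snoc_none cs c hc hlast]
          exact ⟨ins, hmem, hiins⟩
        | some p =>
          obtain ⟨q, hq⟩ := List.getLast?_eq_some_iff.1 hlast
          rw [pv_colsOf_snoc_some cs c p hc hlast, hq, List.dropLast_concat]
          rw [hq] at hmem
          rcases List.mem_append.1 hmem with hm | hm
          · exact ⟨ins, List.mem_append.2 (Or.inl hm), hiins⟩
          · simp only [List.mem_singleton] at hm
            have h1 : p.1 = j := by rw [← hm]
            have h2 : p.2 = ins := by rw [← hm]
            refine ⟨p.2 ++ [cs.length], List.mem_append.2 (Or.inr (by simp [h1])), ?_⟩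
            exact List.mem_append.2 (Or.inl (h2 ▸ hiins))
      · rw [pv_colsOf_snoc_ne cs c hc]
        exact ⟨ins, List.mem_append.2 (Or.inl hmem), hiins⟩
    · -- i = cs.length, so c = "I" and j must be the last anchor
      have hie : i = cs.length := by omega
      have hc : c = "I" := by rw [hie, pv_getD_append_len] at hci; exact hci
      have hjlt : j < cs.length := by omega
      have hcj' : cs.getD j "" ≠ "I" := by
        rw [← pv_getD_append_lt cs [c] "" j hjlt]; exact hcj
      cases hlast : (pvColsOf cs).getLast? with
      | none =>
        have hemp : pvColsOf cs = [] := by simpa using hlast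
        exact absurd (spec1 hemp j hjlt) hcj'
      | some p =>
        have hp := spec2 p.1 p.2 (by simpa using List.mem_of_getLast? hlast)
        have hp3 := spec3 p.1 p.2 (by simpa using hlast)
        have hjp : j = p.1 := by
          rcases Nat.lt_trichotomy j p.1 with h' | h' | h'
          · exfalso
            apply hp.2.1
            rw [← pv_getD_append_lt cs [c] "" p.1 hp.1]
            exact hmid p.1 h' (by omega)
          · exact h'
          · exact absurd (hp3 j h' hjlt) hcj'
        obtain ⟨q, hq⟩ := List.getLast?_eq_some_iff.1 hlast
        rw [pv_colsOf_snoc_some cs c p hc hlast, hq, List.dropLast_concat]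
        refine ⟨p.2 ++ [cs.length], List.mem_append.2 (Or.inr (by simp [hjp])), ?_⟩
        rw [hie]
        exact List.mem_append.2 (Or.inr (by simp))

-- per-line hypotheses extracted from Pre_
theorem pv_hlead_of_pre (lines cigars : List String) (line : String) (hline : line ∈ lines)
    (hpre : Pre_create_reads lines cigars false) :
    ∀ i, i < cigars.length → (∀ k, k ≤ i → cigars.getD k "" = "I") →
      pvReal (pvUp line) i = false := by
  intro i hi h
  exact (pv_real_false_iff _ _).2 (hpre.2 rfl line hline i (List.mem_range.2 hi)
    (fun k hk => h k (Nat.lt_succ_iff.1 (List.mem_range.1 hk))))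

-- ===== VERDICT (by name: the statement is the Claim_ definition above) =====
theorem create_reads_spec : Claim_unchanged_create_reads := by
  unfold Claim_unchanged_create_reads
  intro lines cigars r _hdom hpre
  unfold Spec_create_reads
  intro hnd
  rw [pv_create_reads_eq_map]
  cases r with
  | true =>
    unfold create_reads_alt
    rw [if_pos rfl]
    refine List.map_congr_left (fun line hline => ?_)
    have hlen : cigars.length ≤ (pvUp line).length := by
      rw [pvUp, pv_up_length]; exact hpre.1 line hline
    rw [pv_lineA_true _ _ hlen, List.map_map]
    rfl
  | false =>
    unfold create_reads_alt
    rw [if_neg (by simp)]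
    refine List.map_congr_left (fun line hline => ?_)
    rw [pv_lineA_false _ _ (pv_hlead_of_pre lines cigars line hline hpre)]
    rw [List.map_congr_left (pv_render_eq lines cigars line hline hnd)]

theorem create_reads_changed : Claim_changed_create_reads := by
  unfold Claim_changed_create_reads; decide

theorem create_reads_tight : Claim_exact_create_reads := by
  unfold Claim_exact_create_reads
  intro lines cigars r _hdom hpre hd hEq
  obtain ⟨hr0, line, hline, i, hi, j, hj, hci, hcj, hmid, hIj, hreal⟩ := hd
  subst hr0
  have hi' := List.mem_range.1 hi
  have hj' := List.mem_range.1 hj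
  obtain ⟨ins, hmem, hiins⟩ := pv_colsOf_mem cigars j i hj' hi' hcj hci
    (fun k h1 h2 => hmid k (List.mem_range.2 (by omega)) h1)
  -- the two renderings of column (j, ins) on this line
  have hbase : pvBase ((pvUp line).getD j ' ') = ['I'] := by
    simp only [pvUp]; rw [hIj]; decide
  have hany : ins.any (fun k => pvReal (pvUp line) k) = true :=
    List.any_eq_true.2 ⟨i, hiins, (pv_real_true_iff _ _).2 hreal⟩
  have hrA : pvRenderA (pvUp line) (j, ins) = ['I'] := by
    simp only [pvRenderA]
    rw [if_neg (fun hcon => hcon.2 hbase), hbase]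
  have hrB : pvRenderB (pvUp line) (j, ins) = ['I', 'I'] := by
    simp only [pvRenderB]
    rw [if_pos hany, hbase]; rfl
  -- extract the per-line equality from hEq
  obtain ⟨li, hli, hlive⟩ := List.mem_iff_getElem.1 hline
  rw [pv_create_reads_eq_map] at hEq
  unfold create_reads_alt at hEq
  rw [if_neg (by simp)] at hEq
  have hlineEq := congrArg (fun l => l[li]?) hEq
  simp only [List.getElem?_map] at hlineEq
  rw [List.getElem?_eq_getElem hli, hlive] at hlineEq
  simp only [Option.map_some, Option.some.injEq] at hlineEq
  rw [pv_lineA_false _ _ (pv_hlead_of_pre lines cigars line hline hpre)] at hlineEq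
  -- extract the per-column equality at column (j, ins)
  obtain ⟨ci, hci2, hcive⟩ := List.mem_iff_getElem.1 hmem
  have hcolEq := congrArg (fun l => l[ci]?) hlineEq
  simp only [List.getElem?_map] at hcolEq
  rw [List.getElem?_eq_getElem hci2, hcive] at hcolEq
  simp only [Option.map_some, Option.some.injEq] at hcolEq
  rw [hrA, hrB] at hcolEq
  have := congrArg String.toList hcolEq
  simp at this
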